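-- pv_equiv track=rewrite | github.com/rnartallo/randomlygrownnetworks | CNgraphtools.py | calculateProjectoryDegree
-- ===== SOURCE A (Python) =====
-- def calculateProjectoryDegree(Network):
--     adj = Network[0]
--     nodeInfo= Network[1]
--     degrees = [0]*len(nodeInfo)
--     for i in range(0,len(nodeInfo)):
--         for j in range(0,len(nodeInfo)):
--             if adj[i][j]==1:
--                 if nodeInfo[j][3]!=nodeInfo[i][3]:
--                     degrees[i]+=1
--     return(degrees)
-- ===== SOURCE B (Python) =====
-- def calculateProjectoryDegree(Network):
--     adj = Network[0]
--     nodeInfo = Network[1]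
--     n = len(nodeInfo)
--     degrees = []
--     for i in range(n):
--         neighbours = [j for j in range(n) if adj[i][j] == 1]
--         if neighbours:
--             t = nodeInfo[i][3]
--             same = sum(1 for j in neighbours if nodeInfo[j][3] == t)
--             degrees.append(len(neighbours) - same)
--         else:
--             degrees.append(0)
--     return degrees
-- ===== Notes on version B (the rewrite author's own statement) =====
-- stated objective: alternative
-- what changed: Instead of A's single nested scan that accumulates via a compound per-pair test into a preallocated zero array, B processes each row in two phases: it first filters the row's neighbour indices (adj[i][j]==1), then computes the degree by complement counting (neighbour total minus same-type matches) and builds the output by appending.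
import Mathlib
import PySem

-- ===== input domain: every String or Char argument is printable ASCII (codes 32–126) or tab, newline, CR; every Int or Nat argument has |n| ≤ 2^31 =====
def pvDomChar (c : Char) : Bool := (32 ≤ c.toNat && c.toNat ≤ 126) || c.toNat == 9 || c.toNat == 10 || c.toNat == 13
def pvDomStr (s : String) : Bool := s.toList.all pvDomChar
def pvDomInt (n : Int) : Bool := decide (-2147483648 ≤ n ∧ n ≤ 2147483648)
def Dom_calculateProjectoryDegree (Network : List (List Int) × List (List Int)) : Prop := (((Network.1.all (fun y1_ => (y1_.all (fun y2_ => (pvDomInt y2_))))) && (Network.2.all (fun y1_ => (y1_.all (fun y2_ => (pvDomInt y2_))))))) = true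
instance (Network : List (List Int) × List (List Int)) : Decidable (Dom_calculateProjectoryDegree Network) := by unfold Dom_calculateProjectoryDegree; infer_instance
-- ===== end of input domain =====

-- B replaces A's single compound-test accumulation into a preallocated array by a per-row
-- two-phase pass: first filter the row's neighbour indices, then complement-count
-- (neighbour total minus same-type matches). Objective: alternative decomposition, same cost.

-- ===== PORT A =====
def calculateProjectoryDegree (Network : List (List Int) × List (List Int)) : List Int :=
  let adj := Network.1
  let nodeInfo := Network.2
  let degrees := List.replicate nodeInfo.length (0 : Int)
  (PySem.List.pyRange 0 (nodeInfo.length : Int) 1).foldl (fun degs i =>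
    (PySem.List.pyRange 0 (nodeInfo.length : Int) 1).foldl (fun degs j =>
      if PySem.List.pyGetD (PySem.List.pyGetD adj i []) j 0 == 1 then
        if PySem.List.pyGetD (PySem.List.pyGetD nodeInfo j []) 3 0 != PySem.List.pyGetD (PySem.List.pyGetD nodeInfo i []) 3 0 then
          PySem.List.pySetD degs i (PySem.List.pyGetD degs i 0 + 1)
        else degs
      else degs) degs) degrees

-- ===== PORT B =====
def calculateProjectoryDegree_alt (Network : List (List Int) × List (List Int)) : List Int :=
  let adj := Network.1
  let nodeInfo := Network.2
  let n : Int := (nodeInfo.length : Int)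
  (PySem.List.pyRange 0 n 1).foldl (fun degs i =>
    let neighbours := (PySem.List.pyRange 0 n 1).filter
        (fun j => PySem.List.pyGetD (PySem.List.pyGetD adj i []) j 0 == 1)
    if neighbours ≠ [] then
      let t := PySem.List.pyGetD (PySem.List.pyGetD nodeInfo i []) 3 0
      let same := neighbours.foldl
        (fun c j => if PySem.List.pyGetD (PySem.List.pyGetD nodeInfo j []) 3 0 == t then c + 1 else c) (0 : Int)
      degs ++ [(neighbours.length : Int) - same]
    else degs ++ [(0 : Int)]) []

-- ===== PRECONDITION & SPEC =====
-- Pre_ is exactly where Python A returns normally: adj must have at least len(nodeInfo) rows of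
-- at least len(nodeInfo) entries each, and whenever adj[i][j] == 1 (which makes A read the two
-- type fields) both nodeInfo[j] and nodeInfo[i] must have at least 4 entries.
def Pre_calculateProjectoryDegree (Network : List (List Int) × List (List Int)) : Prop :=
  Network.2.length ≤ Network.1.length ∧
  (∀ row ∈ Network.1.take Network.2.length, Network.2.length ≤ row.length) ∧
  (∀ i ∈ List.range Network.2.length, ∀ j ∈ List.range Network.2.length,
    PySem.List.pyGetD (PySem.List.pyGetD Network.1 (i : Int) []) (j : Int) 0 = 1 →
    4 ≤ (PySem.List.pyGetD Network.2 (j : Int) []).length ∧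
    4 ≤ (PySem.List.pyGetD Network.2 (i : Int) []).length)
instance (Network : List (List Int) × List (List Int)) : Decidable (Pre_calculateProjectoryDegree Network) := by unfold Pre_calculateProjectoryDegree; infer_instance

def pvWitness_calculateProjectoryDegree : (List (List Int) × List (List Int)) :=
  ([[0, 1], [1, 0]], [[0, 0, 0, 5], [0, 0, 0, 7]])

def Spec_calculateProjectoryDegree (Network : List (List Int) × List (List Int)) (out : List Int) : Prop := out = calculateProjectoryDegree_alt Network
instance (Network : List (List Int) × List (List Int)) (out : List Int) : Decidable (Spec_calculateProjectoryDegree Network out) := by unfold Spec_calculateProjectoryDegree; infer_instance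

-- ===== CLAIM (what is proved, stated in full; the proofs are below) =====
def Claim_equal_calculateProjectoryDegree : Prop := ∀ (Network : List (List Int) × List (List Int)), Dom_calculateProjectoryDegree Network → Pre_calculateProjectoryDegree Network → Spec_calculateProjectoryDegree Network (calculateProjectoryDegree Network)

-- ===== LEMMAS AND PROOFS =====

-- the per-pair test of A: adj[i][j] == 1 and types differ
def pvTest (adj ni : List (List Int)) (i j : Int) : Bool :=
  (PySem.List.pyGetD (PySem.List.pyGetD adj i []) j 0 == 1) &&
  (PySem.List.pyGetD (PySem.List.pyGetD ni j []) 3 0 != PySem.List.pyGetD (PySem.List.pyGetD ni i []) 3 0)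

-- A's inner loop: it only ever bumps index i, by one per j passing the test
theorem pv_inner (adj ni : List (List Int)) (i : Int) (h0 : 0 ≤ i)
    (js ds : List Int) (hi : i.toNat < ds.length) :
    js.foldl (fun degs j =>
      if PySem.List.pyGetD (PySem.List.pyGetD adj i []) j 0 == 1 then
        if PySem.List.pyGetD (PySem.List.pyGetD ni j []) 3 0 != PySem.List.pyGetD (PySem.List.pyGetD ni i []) 3 0 then
          PySem.List.pySetD degs i (PySem.List.pyGetD degs i 0 + 1)
        else degs
      else degs) ds
    = ds.set i.toNat (ds[i.toNat] + (js.countP (pvTest adj ni i) : Int)) := by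
  induction js generalizing ds with
  | nil => simp [List.set_getElem_self]
  | cons j js ih =>
    have hlt : i < (ds.length : Int) := by omega
    simp only [List.foldl_cons, List.countP_cons]
    by_cases h1 : (PySem.List.pyGetD (PySem.List.pyGetD adj i []) j 0 == 1) = true
    · by_cases h2 : (PySem.List.pyGetD (PySem.List.pyGetD ni j []) 3 0 != PySem.List.pyGetD (PySem.List.pyGetD ni i []) 3 0) = true
      · rw [if_pos h1, if_pos h2, PySem.List.pySetD_of_nonneg _ _ h0,
            PySem.List.pyGetD_eq_getElem _ _ h0 hlt,
            ih _ (by simpa using hi)]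
        have htest : pvTest adj ni i j = true := by simp [pvTest, h1, h2]
        rw [List.getElem_set_self (by simpa using hi), List.set_set]
        simp only [htest]
        congr 1
        push_cast
        ring
      · rw [if_pos h1, if_neg h2, ih _ hi]
        have htest : pvTest adj ni i j = false := by
          simp only [pvTest, Bool.and_eq_false_iff]
          right; simpa using h2
        simp [htest]
    · rw [if_neg h1, ih _ hi]
      have htest : pvTest adj ni i j = false := by
        simp only [pvTest, Bool.and_eq_false_iff]
        left; simpa using h1
      simp [htest]

-- A's outer loop over the first m indices: prefix of the per-index counts
theorem pv_outer (adj ni : List (List Int)) (js : List Int) (m : Nat) (hm : m ≤ ni.length) :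
    ((List.range m).map (fun (k : Nat) => (k : Int))).foldl
      (fun degs i => js.foldl (fun degs j =>
        if PySem.List.pyGetD (PySem.List.pyGetD adj i []) j 0 == 1 then
          if PySem.List.pyGetD (PySem.List.pyGetD ni j []) 3 0 != PySem.List.pyGetD (PySem.List.pyGetD ni i []) 3 0 then
            PySem.List.pySetD degs i (PySem.List.pyGetD degs i 0 + 1)
          else degs
        else degs) degs)
      (List.replicate ni.length (0 : Int))
    = (List.range ni.length).map (fun k =>
        if k < m then (js.countP (pvTest adj ni (k : Int)) : Int) else 0) := by
  induction m with
  | zero =>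
    simp only [List.range_zero, List.map_nil, List.foldl_nil]
    apply List.ext_getElem (by simp)
    intro k h1 h2
    simp
  | succ m ih =>
    rw [List.range_succ, List.map_append, List.foldl_append, ih (by omega)]
    simp only [List.map_cons, List.map_nil, List.foldl_cons, List.foldl_nil]
    rw [pv_inner adj ni (m : Int) (by positivity) js _ (by simp; omega)]
    apply List.ext_getElem (by simp)
    intro k h1 h2
    have hmn : m < ni.length := by omega
    simp only [Int.toNat_natCast, List.getElem_set, List.getElem_map, List.getElem_range] at *
    by_cases hk : k = m
    · subst hk
      simp
    · have hk' : ¬ m = k := fun h => hk h.symm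
      by_cases hkm : k < m
      · simp [hk', hkm, Nat.lt_succ_of_lt hkm]
      · have h' : ¬ k < m + 1 := by omega
        simp [hk', hkm, h']

-- an if that appends on both branches appends an if
theorem pv_push_if {c : Prop} [Decidable c] (degs : List Int) (a : Int) :
    (if c then degs ++ [a] else degs ++ [(0 : Int)]) = degs ++ [if c then a else 0] := by
  split <;> rfl

-- counting a test and its negation covers the list
theorem pv_count_not (q : Int → Bool) (l : List Int) :
    l.countP q + l.countP (fun j => !(q j)) = l.length := by
  induction l with
  | nil => simp
  | cons x l ih => by_cases h : q x = true <;> simp [h] <;> omega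

-- per node: cross-type count = (neighbour total) − (same-type neighbour count)
theorem pv_pointwise (adj ni : List (List Int)) (js : List Int) (i : Int) :
    (js.countP (pvTest adj ni i) : Int)
    = if (js.filter (fun j => PySem.List.pyGetD (PySem.List.pyGetD adj i []) j 0 == 1)) ≠ [] then
        ((js.filter (fun j => PySem.List.pyGetD (PySem.List.pyGetD adj i []) j 0 == 1)).length : Int)
        - (js.filter (fun j => PySem.List.pyGetD (PySem.List.pyGetD adj i []) j 0 == 1)).foldl
            (fun c j => if PySem.List.pyGetD (PySem.List.pyGetD ni j []) 3 0 == PySem.List.pyGetD (PySem.List.pyGetD ni i []) 3 0 then c + 1 else c) (0 : Int)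
      else 0 := by
  rw [PySem.List.foldl_if_add_one]
  have hc : js.countP (pvTest adj ni i)
      = (js.filter (fun j => PySem.List.pyGetD (PySem.List.pyGetD adj i []) j 0 == 1)).countP
          (fun j => !(PySem.List.pyGetD (PySem.List.pyGetD ni j []) 3 0 == PySem.List.pyGetD (PySem.List.pyGetD ni i []) 3 0)) := by
    rw [List.countP_filter]
    apply List.countP_congr
    intro x _
    simp [pvTest, bne, Bool.and_comm]
  rw [hc]
  by_cases h : (js.filter (fun j => PySem.List.pyGetD (PySem.List.pyGetD adj i []) j 0 == 1)) = []
  · simp [h]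
  · rw [if_pos h]
    have hn := pv_count_not
      (fun j => PySem.List.pyGetD (PySem.List.pyGetD ni j []) 3 0 == PySem.List.pyGetD (PySem.List.pyGetD ni i []) 3 0)
      (js.filter (fun j => PySem.List.pyGetD (PySem.List.pyGetD adj i []) j 0 == 1))
    push_cast at hn ⊢
    omega

-- ===== VERDICT (by name: the statement is the Claim_ definition above) =====
theorem calculateProjectoryDegree_spec : Claim_equal_calculateProjectoryDegree := by
  intro N _hdom _hpre
  unfold Spec_calculateProjectoryDegree calculateProjectoryDegree calculateProjectoryDegree_alt
  simp only [PySem.List.pyRange_zero_natCast]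
  rw [pv_outer N.1 N.2 _ N.2.length le_rfl]
  simp only [pv_push_if]
  rw [PySem.List.foldl_append_singleton_eq_map, List.nil_append, List.map_map]
  apply List.map_congr_left
  intro k hk
  simp only [Function.comp_apply]
  rw [← pv_pointwise]
  simp [List.mem_range.mp hk]
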